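-- pv_equiv track=rewrite | github.com/seminss/algorithm-study | mingeun/Lv2/154540.py | bfs
-- ===== SOURCE A (Python) =====
-- from collections import deque
--
-- VISITED = '-1'
--
-- def bfs(s:list, data:list):
--     dx, dy = [1, 0, -1, 0], [0, 1, 0, -1]
--     q = deque([ (s[0], s[1]) ])
--     result = int(data[s[0]][s[1]])
--     data[s[0]][s[1]] = VISITED
--     while q:
--         (x, y) = q.popleft()
--         for i in range(4):
--             xn, yn = x+dx[i], y+dy[i]
--             if 0<=xn<len(data) and 0<=yn<len(data[0]) and data[xn][yn] != VISITED and data[xn][yn] != 'X':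
--                 result += int(data[xn][yn])
--                 q.append((xn, yn))
--                 data[xn][yn] = VISITED
--     return result
-- ===== SOURCE B (Python) =====
-- def bfs(s: list, data: list):
--     # Same seed step as the task demands (read, count and mark the start cell), but the
--     # expansion is a LIFO worklist with check-at-pop: neighbour coordinates are pushed
--     # unconditionally (duplicates and out-of-window candidates allowed) and the single
--     # bounds/visited/value guard runs when a cell is popped, so traversal is depth-first.
--     x, y = s[0], s[1]
--     total = int(data[x][y])
--     data[x][y] = '-1'
--     stack = [(x + 1, y), (x, y + 1), (x - 1, y), (x, y - 1)]
--     while stack: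
--         x, y = stack.pop()
--         if 0 <= x < len(data) and 0 <= y < len(data[0]) and data[x][y] != '-1' and data[x][y] != 'X':
--             total += int(data[x][y])
--             data[x][y] = '-1'
--             stack += [(x + 1, y), (x, y + 1), (x - 1, y), (x, y - 1)]
--     return total
-- ===== Notes on version B (the rewrite author's own statement) =====
-- stated objective: alternative
-- what changed: A's mark-on-enqueue BFS queue (guard and marking applied to each neighbour before it is enqueued, FIFO order) is replaced by a LIFO worklist with check-at-pop: B pushes the four raw neighbour coordinates unconditionally (duplicates and out-of-window candidates allowed on the stack) and applies one uniform bounds/visited/value guard when a cell is popped, so cells are counted and marked at pop time and the traversal is depth-first.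
-- outside the precondition, e.g. on bfs([0, 0], [['1', '2', 'X', 'zz']]): A returns 3, B returns 3; on bfs([0, 0], [['1', '2', 'X'], ['X', 'X'], ['zz', '!']]): A returns 3, B returns 3
import Mathlib
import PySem

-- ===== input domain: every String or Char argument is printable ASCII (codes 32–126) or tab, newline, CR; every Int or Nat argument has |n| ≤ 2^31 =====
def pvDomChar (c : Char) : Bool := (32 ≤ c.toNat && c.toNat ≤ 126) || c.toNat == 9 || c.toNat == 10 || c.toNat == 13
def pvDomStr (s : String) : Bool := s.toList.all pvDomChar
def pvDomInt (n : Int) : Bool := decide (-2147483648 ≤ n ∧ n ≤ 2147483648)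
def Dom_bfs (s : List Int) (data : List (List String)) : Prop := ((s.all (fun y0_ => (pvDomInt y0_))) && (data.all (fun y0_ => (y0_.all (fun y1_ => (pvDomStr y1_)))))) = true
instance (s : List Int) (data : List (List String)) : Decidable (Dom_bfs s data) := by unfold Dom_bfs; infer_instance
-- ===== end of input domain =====

-- B keeps A's seed step (read, count, mark the start cell) but replaces the mark-on-enqueue
-- BFS queue by a LIFO worklist with check-at-pop: neighbour coordinates are pushed
-- unconditionally (duplicates / out-of-window candidates allowed) and one uniform
-- bounds/visited/value guard runs when a cell is popped, so the traversal is depth-first.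
-- Like A, B mutates `data` in place (identically); the equivalence proved is about the
-- return value.

-- shared grid accessors (Python data[x][y] reads/writes, len(data[0]))
def cellD (g : List (List String)) (x y : Int) : String :=
  (((PySem.List.pyGet? g x).bind (fun row => PySem.List.pyGet? row y)).getD "")

def cols (g : List (List String)) : Nat := ((PySem.List.pyGet? g 0).getD []).length

def gridSet (g : List (List String)) (x y : Int) (v : String) : List (List String) :=
  match PySem.List.pyGet? g x with
  | some row => PySem.List.pySetD g x (PySem.List.pySetD row y v)
  | none => g

-- ===== PORT A =====  (transliteration of the Python BFS; fuel bounds the while-loop: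
-- each iteration pops one entry and every push marks a distinct in-window cell, so
-- len(data)*len(data[0])+1 iterations always suffice; s[0]/int(...) raising is outside Pre_)
def bfsDx : List Int := [1, 0, -1, 0]
def bfsDy : List Int := [0, 1, 0, -1]

def stepNbr (x y : Int) (st : List (Int × Int) × List (List String) × Int) (i : Int) :
    List (Int × Int) × List (List String) × Int :=
  let xn := x + PySem.List.pyGetD bfsDx i 0
  let yn := y + PySem.List.pyGetD bfsDy i 0
  if 0 ≤ xn ∧ xn < (st.2.1.length : Int) ∧ 0 ≤ yn ∧ yn < (cols st.2.1 : Int) ∧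
      cellD st.2.1 xn yn ≠ "-1" ∧ cellD st.2.1 xn yn ≠ "X" then
    (st.1 ++ [(xn, yn)], gridSet st.2.1 xn yn "-1",
      st.2.2 + (PySem.Int.ofStr? (cellD st.2.1 xn yn)).getD 0)
  else st

def bfsLoop : Nat → List (Int × Int) → List (List String) → Int → Int
  | 0, _, _, r => r
  | _ + 1, [], _, r => r
  | fuel + 1, (x, y) :: q, g, r =>
    let st := (PySem.List.pyRange 0 4 1).foldl (stepNbr x y) (q, g, r)
    bfsLoop fuel st.1 st.2.1 st.2.2

def bfs (s : List Int) (data : List (List String)) : Int :=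
  let x0 := (PySem.List.pyGet? s 0).getD 0
  let y0 := (PySem.List.pyGet? s 1).getD 0
  let result := (PySem.Int.ofStr? (cellD data x0 y0)).getD 0
  let data1 := gridSet data x0 y0 "-1"
  bfsLoop (data.length * cols data + 1) [(x0, y0)] data1 result

-- ===== PORT B =====  (transliteration of Source B; the Python stack's top is the list head,
-- so `for d in dirs: stack.append(...)` followed by pop-from-the-end is the cons-fold below;
-- each processed cell pops once and pushes 4, and only in-window unvisited cells are processed,
-- so 1 + 5*len(data)*len(data[0]) iterations always suffice)
def dirs4 : List (Int × Int) := [(1, 0), (0, 1), (-1, 0), (0, -1)]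

def floodLoop : Nat → List (Int × Int) → List (List String) → Int → Int
  | 0, _, _, total => total
  | _ + 1, [], _, total => total
  | fuel + 1, (x, y) :: rest, g, total =>
    if 0 ≤ x ∧ x < (g.length : Int) ∧ 0 ≤ y ∧ y < (cols g : Int) ∧
        cellD g x y ≠ "-1" ∧ cellD g x y ≠ "X" then
      floodLoop fuel (dirs4.foldl (fun st d => (x + d.1, y + d.2) :: st) rest)
        (gridSet g x y "-1") (total + (PySem.Int.ofStr? (cellD g x y)).getD 0)
    else floodLoop fuel rest g total

def bfs_alt (s : List Int) (data : List (List String)) : Int :=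
  let x := (PySem.List.pyGet? s 0).getD 0
  let y := (PySem.List.pyGet? s 1).getD 0
  let total := (PySem.Int.ofStr? (cellD data x y)).getD 0
  let data1 := gridSet data x y "-1"
  -- Python's initial stack [(x+1,y),(x,y+1),(x-1,y),(x,y-1)] pops from the END: top-first below
  floodLoop (5 * (data.length * cols data) + 4)
    [(x, y - 1), (x - 1, y), (x, y + 1), (x + 1, y)] data1 total

-- ===== PRECONDITION & SPEC =====
def cellAt (data : List (List String)) (x y : Int) : Option String :=
  PySem.List.pyGet? ((PySem.List.pyGet? data x).getD []) y

def startCell (s : List Int) (data : List (List String)) : Option String :=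
  (PySem.List.pyGet? s 0).bind fun x =>
    (PySem.List.pyGet? s 1).bind fun y =>
      (PySem.List.pyGet? data x).bind fun row => PySem.List.pyGet? row y

-- Pre_ excludes the inputs on which A raises: start indices unreadable (IndexError, also s
-- shorter than 2), a start cell that does not parse as an int (ValueError, e.g. 'X'), and — a
-- stated conservative narrowing, since reachability is not a closed form — grids that are
-- neither globally clean (every row at least len(data[0]) long, every cell in the first
-- len(data[0]) columns 'X' or an int literal) nor trivially safe because each of the four
-- start neighbours is out of the window or a readable 'X'/'-1'; this also excludes some
-- grids whose garbage or short rows A never reaches (A and B return the same value there;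
-- see the cites in claim.json).
def Pre_bfs (s : List Int) (data : List (List String)) : Prop :=
  (startCell s data).isSome = true ∧
  (PySem.Int.ofStr? ((startCell s data).getD "")).isSome = true ∧
  ((∀ row ∈ data, cols data ≤ row.length ∧
      ∀ cell ∈ row.take (cols data), cell = "X" ∨ (PySem.Int.ofStr? cell).isSome = true) ∨
   (∀ p ∈ [(PySem.List.pyGetD s 0 0 + 1, PySem.List.pyGetD s 1 0),
           (PySem.List.pyGetD s 0 0, PySem.List.pyGetD s 1 0 + 1),
           (PySem.List.pyGetD s 0 0 - 1, PySem.List.pyGetD s 1 0),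
           (PySem.List.pyGetD s 0 0, PySem.List.pyGetD s 1 0 - 1)],
      (p.1 < 0 ∨ (data.length : Int) ≤ p.1 ∨ p.2 < 0 ∨ (cols data : Int) ≤ p.2) ∨
      cellAt data p.1 p.2 = some "X" ∨ cellAt data p.1 p.2 = some "-1"))
instance (s : List Int) (data : List (List String)) : Decidable (Pre_bfs s data) := by
  unfold Pre_bfs; infer_instance

def pvWitness_bfs : List Int × List (List String) := ([0, 1], [["5", "-7"], ["X", "2"]])

def Spec_bfs (s : List Int) (data : List (List String)) (out : Int) : Prop :=
  out = bfs_alt s data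
instance (s : List Int) (data : List (List String)) (out : Int) : Decidable (Spec_bfs s data out) := by
  unfold Spec_bfs; infer_instance

-- ===== CLAIM (what is proved, stated in full; the proofs are below) =====
def Claim_equal_bfs : Prop := ∀ (s : List Int) (data : List (List String)),
  Dom_bfs s data → Pre_bfs s data → Spec_bfs s data (bfs s data)

-- ===== LEMMAS AND PROOFS =====

-- abstract layer: the in-window grid, "live" (unvisited, non-wall) cells, 4-adjacency reachability
def WF (g : List (List String)) : Prop := ∀ row ∈ g, cols g ≤ row.length

def nbrs (c : Int × Int) : List (Int × Int) :=
  [(c.1 + 1, c.2), (c.1, c.2 + 1), (c.1 - 1, c.2), (c.1, c.2 - 1)]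

def mark (g : List (List String)) (c : Int × Int) : List (List String) :=
  gridSet g c.1 c.2 "-1"

def markList (g : List (List String)) (M : List (Int × Int)) : List (List String) :=
  M.foldl mark g

def valC (g : List (List String)) (c : Int × Int) : Int :=
  (PySem.Int.ofStr? (cellD g c.1 c.2)).getD 0

def okB (g : List (List String)) (c : Int × Int) : Bool :=
  decide (0 ≤ c.1 ∧ c.1 < (g.length : Int) ∧ 0 ≤ c.2 ∧ c.2 < (cols g : Int) ∧
    cellD g c.1 c.2 ≠ "-1" ∧ cellD g c.1 c.2 ≠ "X")

def stepCell (st : List (Int × Int) × List (List String) × Int) (c : Int × Int) :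
    List (Int × Int) × List (List String) × Int :=
  if 0 ≤ c.1 ∧ c.1 < (st.2.1.length : Int) ∧ 0 ≤ c.2 ∧ c.2 < (cols st.2.1 : Int) ∧
      cellD st.2.1 c.1 c.2 ≠ "-1" ∧ cellD st.2.1 c.1 c.2 ≠ "X" then
    (st.1 ++ [c], gridSet st.2.1 c.1 c.2 "-1",
      st.2.2 + (PySem.Int.ofStr? (cellD st.2.1 c.1 c.2)).getD 0)
  else st

def adjRel (g : List (List String)) (a b : Int × Int) : Prop := b ∈ nbrs a ∧ okB g b = true
def reachStar (g : List (List String)) : (Int × Int) → (Int × Int) → Prop :=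
  Relation.ReflTransGen (adjRel g)

-- cells charged by A's loop from queue `roots` (all already marked), resp. by B's from stack `roots`
def NRA (g : List (List String)) (roots : List (Int × Int)) (n : Int × Int) : Prop :=
  okB g n = true ∧ ∃ t ∈ roots, reachStar g t n
def NRB (g : List (List String)) (roots : List (Int × Int)) (n : Int × Int) : Prop :=
  ∃ t ∈ roots, okB g t = true ∧ reachStar g t n

def SA (g : List (List String)) : Finset (Int × Int) :=
  (Finset.range g.length ×ˢ Finset.range (cols g)).image (fun p => ((p.1 : Int), (p.2 : Int)))

noncomputable def chargeA (g : List (List String)) (roots : List (Int × Int)) : Int :=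
  ∑ c ∈ @Finset.filter _ (fun c => NRA g roots c) (fun _ => Classical.propDecidable _) (SA g),
    valC g c
noncomputable def chargeB (g : List (List String)) (roots : List (Int × Int)) : Int :=
  ∑ c ∈ @Finset.filter _ (fun c => NRB g roots c) (fun _ => Classical.propDecidable _) (SA g),
    valC g c

def okCard (g : List (List String)) : Nat := ((SA g).filter (fun c => okB g c = true)).card


-- ---- index / grid basics ----

theorem pvGet_nonneg {α : Type} (g : List α) (x : Int) (hx : 0 ≤ x) :
    PySem.List.pyGet? g x = g[x.toNat]? := by
  simp [PySem.List.pyGet?, PySem.List.pyIdx?]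
  split_ifs with h1 <;> simp_all

theorem pvIdx_lt {n : Nat} {i : Int} {k : Nat} (h : PySem.List.pyIdx? n i = some k) : k < n := by
  unfold PySem.List.pyIdx? at h
  split_ifs at h <;> simp_all <;> omega

theorem gridSet_eq_of_idx {g : List (List String)} {x : Int} {k : Nat}
    (hk : PySem.List.pyIdx? g.length x = some k) (y : Int) (v : String) :
    ∃ row, g[k]? = some row ∧ gridSet g x y v = g.set k (PySem.List.pySetD row y v) := by
  have hklt : k < g.length := pvIdx_lt hk
  refine ⟨g[k], by simp [hklt], ?_⟩
  unfold gridSet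
  have hget : PySem.List.pyGet? g x = some g[k] := by
    simp [PySem.List.pyGet?, hk, hklt]
  rw [hget]
  simp [PySem.List.pySetD, PySem.List.pySet?, hk]

theorem gridSet_eq_of_none {g : List (List String)} {x : Int}
    (hk : PySem.List.pyIdx? g.length x = none) (y : Int) (v : String) :
    gridSet g x y v = g := by
  unfold gridSet
  have hget : PySem.List.pyGet? g x = none := by simp [PySem.List.pyGet?, hk]
  rw [hget]

theorem length_gridSet (g : List (List String)) (x y : Int) (v : String) :
    (gridSet g x y v).length = g.length := by
  cases hk : PySem.List.pyIdx? g.length x with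
  | none => rw [gridSet_eq_of_none hk]
  | some k =>
    obtain ⟨row, _, heq⟩ := gridSet_eq_of_idx hk y v
    rw [heq]; simp

theorem rowlen_gridSet (g : List (List String)) (x y : Int) (v : String) (j : Nat) :
    ((gridSet g x y v)[j]?).map List.length = (g[j]?).map List.length := by
  cases hk : PySem.List.pyIdx? g.length x with
  | none => rw [gridSet_eq_of_none hk]
  | some k =>
    obtain ⟨row, hrow, heq⟩ := gridSet_eq_of_idx hk y v
    rw [heq]
    by_cases hjk : k = j
    · subst hjk
      have hklt : k < g.length := pvIdx_lt hk
      simp [hklt, PySem.List.length_pySetD]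
      have : g[k]? = some g[k] := by simp [hklt]
      rw [hrow] at this
      simp_all
    · simp [List.getElem?_set_ne hjk]

theorem cols_gridSet (g : List (List String)) (x y : Int) (v : String) :
    cols (gridSet g x y v) = cols g := by
  have h0 := rowlen_gridSet g x y v 0
  have hc : ∀ (h : List (List String)), cols h = ((h[0]?).map List.length).getD 0 := by
    intro h
    unfold cols
    rw [show PySem.List.pyGet? h 0 = h[0]? from pvGet_nonneg h 0 (le_refl 0)]
    cases h[0]? <;> rfl
  rw [hc, hc, h0]

theorem WF_gridSet {g : List (List String)} (hwf : WF g) (x y : Int) (v : String) :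
    WF (gridSet g x y v) := by
  intro row hrow
  obtain ⟨j, hj⟩ := List.mem_iff_getElem?.mp hrow
  have := rowlen_gridSet g x y v j
  rw [hj] at this
  cases hg : g[j]? with
  | none => rw [hg] at this; simp at this
  | some row0 =>
    rw [hg] at this
    simp at this
    have hmem : row0 ∈ g := List.mem_of_getElem? hg
    have := hwf row0 hmem
    rw [cols_gridSet]
    omega

theorem cellD_of_nonneg (g : List (List String)) {x y : Int} (hx : 0 ≤ x) (hy : 0 ≤ y) :
    cellD g x y = (((g[x.toNat]?).getD [])[y.toNat]?).getD "" := by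
  unfold cellD
  rw [pvGet_nonneg g x hx]
  cases hg : g[x.toNat]? with
  | none => simp
  | some row => simp [pvGet_nonneg row y hy]

theorem cellD_gridSet_self {g : List (List String)} (hwf : WF g) {x y : Int} (v : String)
    (hx : 0 ≤ x) (hx2 : x < (g.length : Int)) (hy : 0 ≤ y) (hy2 : y < (cols g : Int)) :
    cellD (gridSet g x y v) x y = v := by
  have hidx : PySem.List.pyIdx? g.length x = some x.toNat := by
    unfold PySem.List.pyIdx?; rw [if_pos hx, if_pos hx2]
  obtain ⟨row, hrow, heq⟩ := gridSet_eq_of_idx hidx y v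
  have hxlt : x.toNat < g.length := pvIdx_lt hidx
  have hrowmem : row ∈ g := List.mem_of_getElem? hrow
  have hylt : y.toNat < row.length := by
    have := hwf row hrowmem; omega
  have hset : PySem.List.pySetD row y v = row.set y.toNat v :=
    PySem.List.pySetD_of_nonneg row v hy
  rw [heq, cellD_of_nonneg _ hx hy, hset]
  have : (g.set x.toNat (row.set y.toNat v))[x.toNat]? = some (row.set y.toNat v) := by
    simp [hxlt]
  rw [this]
  simp [hylt]

theorem cellD_gridSet_ne {g : List (List String)} {a b x y : Int} (v : String)
    (ha : 0 ≤ a) (hb : 0 ≤ b) (hx : 0 ≤ x) (hy : 0 ≤ y) (hne : (x, y) ≠ (a, b)) :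
    cellD (gridSet g a b v) x y = cellD g x y := by
  cases hk : PySem.List.pyIdx? g.length a with
  | none => rw [gridSet_eq_of_none hk]
  | some k =>
    obtain ⟨row, hrow, heq⟩ := gridSet_eq_of_idx hk b v
    have hka : k = a.toNat := by
      unfold PySem.List.pyIdx? at hk
      rw [if_pos ha] at hk
      split_ifs at hk
      simp_all
    subst hka
    rw [heq, cellD_of_nonneg _ hx hy, cellD_of_nonneg _ hx hy]
    by_cases hxa : x = a
    · subst hxa
      have hyb : y ≠ b := by
        intro h; exact hne (by rw [h])
      have hybn : y.toNat ≠ b.toNat := by omega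
      have hxlt : x.toNat < g.length := pvIdx_lt hk
      have : (g.set x.toNat (PySem.List.pySetD row b v))[x.toNat]? =
          some (PySem.List.pySetD row b v) := by simp [hxlt]
      rw [this]
      have hrow' : g[x.toNat]? = some row := hrow
      rw [hrow']
      rw [PySem.List.pySetD_of_nonneg row v hb]
      simp [List.getElem?_set_ne (by omega : b.toNat ≠ y.toNat)]
    · have : x.toNat ≠ a.toNat := by omega
      rw [List.getElem?_set_ne (by omega : a.toNat ≠ x.toNat)]


-- ---- ok / val under marking ----

theorem okB_nonneg {g : List (List String)} {c : Int × Int} (h : okB g c = true) :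
    0 ≤ c.1 ∧ c.1 < (g.length : Int) ∧ 0 ≤ c.2 ∧ c.2 < (cols g : Int) := by
  unfold okB at h
  simp only [decide_eq_true_eq] at h
  exact ⟨h.1, h.2.1, h.2.2.1, h.2.2.2.1⟩

theorem okB_mark_self {g : List (List String)} (hwf : WF g) (c : Int × Int) :
    okB (mark g c) c = false := by
  unfold okB mark
  simp only [decide_eq_false_iff_not]
  intro ⟨h1, h2, h3, h4, h5, _⟩
  rw [length_gridSet] at h2
  rw [cols_gridSet] at h4
  exact h5 (cellD_gridSet_self hwf "-1" h1 h2 h3 h4)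

theorem okB_mark_ne {g : List (List String)} {c c' : Int × Int}
    (hc1 : 0 ≤ c.1) (hc2 : 0 ≤ c.2) (hne : c' ≠ c) :
    okB (mark g c) c' = okB g c' := by
  unfold okB mark
  by_cases hnn : 0 ≤ c'.1 ∧ 0 ≤ c'.2
  · have hcell : cellD (gridSet g c.1 c.2 "-1") c'.1 c'.2 = cellD g c'.1 c'.2 := by
      refine cellD_gridSet_ne "-1" hc1 hc2 hnn.1 hnn.2 ?_
      intro h
      exact hne (Prod.ext (congrArg Prod.fst h) (congrArg Prod.snd h))
    rw [length_gridSet, cols_gridSet, hcell]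
  · rcases not_and_or.mp hnn with h | h <;> simp [h]

theorem valC_mark_ne {g : List (List String)} {c c' : Int × Int}
    (hc1 : 0 ≤ c.1) (hc2 : 0 ≤ c.2) (hc1' : 0 ≤ c'.1) (hc2' : 0 ≤ c'.2) (hne : c' ≠ c) :
    valC (mark g c) c' = valC g c' := by
  unfold valC mark
  rw [cellD_gridSet_ne "-1" hc1 hc2 hc1' hc2'
    (fun h => hne (Prod.ext (congrArg Prod.fst h) (congrArg Prod.snd h)))]

theorem length_mark (g : List (List String)) (c : Int × Int) : (mark g c).length = g.length :=
  length_gridSet g c.1 c.2 "-1"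
theorem cols_mark (g : List (List String)) (c : Int × Int) : cols (mark g c) = cols g :=
  cols_gridSet g c.1 c.2 "-1"
theorem WF_mark {g : List (List String)} (hwf : WF g) (c : Int × Int) : WF (mark g c) :=
  WF_gridSet hwf c.1 c.2 "-1"

theorem markList_cons (g : List (List String)) (m : Int × Int) (M : List (Int × Int)) :
    markList g (m :: M) = markList (mark g m) M := rfl

theorem length_markList (g : List (List String)) (M : List (Int × Int)) :
    (markList g M).length = g.length := by
  induction M generalizing g with
  | nil => rfl
  | cons m M ih => rw [markList_cons, ih, length_mark]
theorem cols_markList (g : List (List String)) (M : List (Int × Int)) :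
    cols (markList g M) = cols g := by
  induction M generalizing g with
  | nil => rfl
  | cons m M ih => rw [markList_cons, ih, cols_mark]
theorem WF_markList {g : List (List String)} (hwf : WF g) (M : List (Int × Int)) :
    WF (markList g M) := by
  induction M generalizing g with
  | nil => exact hwf
  | cons m M ih => exact ih (WF_mark hwf m)

theorem okB_markList {g : List (List String)} {M : List (Int × Int)}
    (hwf : WF g) (hM : ∀ m ∈ M, okB g m = true) (hnd : M.Nodup) (b : Int × Int) :
    okB (markList g M) b = true ↔ okB g b = true ∧ b ∉ M := by
  induction M generalizing g with
  | nil => simp [markList]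
  | cons m M ih =>
    have hm := hM m List.mem_cons_self
    have hmn := okB_nonneg hm
    have hnd' := List.nodup_cons.mp hnd
    have hM' : ∀ e ∈ M, okB (mark g m) e = true := by
      intro e he
      rw [okB_mark_ne hmn.1 hmn.2.2.1 (fun h => hnd'.1 (h ▸ he))]
      exact hM e (List.mem_cons_of_mem m he)
    rw [markList_cons, ih (WF_mark hwf m) hM' hnd'.2]
    constructor
    · rintro ⟨hok, hnm⟩
      by_cases hbm : b = m
      · subst hbm; rw [okB_mark_self hwf] at hok; cases hok
      · rw [okB_mark_ne hmn.1 hmn.2.2.1 hbm] at hok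
        exact ⟨hok, by simp [hbm, hnm]⟩
    · rintro ⟨hok, hnm⟩
      have hbm : b ≠ m := fun h => hnm (h ▸ List.mem_cons_self)
      exact ⟨by rw [okB_mark_ne hmn.1 hmn.2.2.1 hbm]; exact hok,
        fun h => hnm (List.mem_cons_of_mem m h)⟩

theorem valC_markList {g : List (List String)} {M : List (Int × Int)} {b : Int × Int}
    (hM : ∀ m ∈ M, okB g m = true) (hnd : M.Nodup) (hb1 : 0 ≤ b.1) (hb2 : 0 ≤ b.2)
    (hbM : b ∉ M) : valC (markList g M) b = valC g b := by
  induction M generalizing g with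
  | nil => rfl
  | cons m M ih =>
    have hmn := okB_nonneg (hM m List.mem_cons_self)
    have hnd' := List.nodup_cons.mp hnd
    have hbm : b ≠ m := fun h => hbM (h ▸ List.mem_cons_self)
    have hM' : ∀ e ∈ M, okB (mark g m) e = true := by
      intro e he
      rw [okB_mark_ne hmn.1 hmn.2.2.1 (fun h => hnd'.1 (h ▸ he))]
      exact hM e (List.mem_cons_of_mem m he)
    rw [markList_cons, ih hM' hnd'.2 (fun h => hbM (List.mem_cons_of_mem m h)),
      valC_mark_ne hmn.1 hmn.2.2.1 hb1 hb2 hbm]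

-- ---- the inner neighbour folds of the two ports ----

theorem stepNbr_eval (x y : Int) (st : List (Int × Int) × List (List String) × Int) :
    ((stepNbr x y st 0 = stepCell st (x + 1, y)) ∧
     (stepNbr x y st 1 = stepCell st (x, y + 1)) ∧
     (stepNbr x y st 2 = stepCell st (x - 1, y)) ∧
     (stepNbr x y st 3 = stepCell st (x, y - 1))) := by
  have h0x : PySem.List.pyGetD bfsDx (0 : Int) 0 = 1 := by decide
  have h0y : PySem.List.pyGetD bfsDy (0 : Int) 0 = 0 := by decide
  have h1x : PySem.List.pyGetD bfsDx (1 : Int) 0 = 0 := by decide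
  have h1y : PySem.List.pyGetD bfsDy (1 : Int) 0 = 1 := by decide
  have h2x : PySem.List.pyGetD bfsDx (2 : Int) 0 = -1 := by decide
  have h2y : PySem.List.pyGetD bfsDy (2 : Int) 0 = 0 := by decide
  have h3x : PySem.List.pyGetD bfsDx (3 : Int) 0 = 0 := by decide
  have h3y : PySem.List.pyGetD bfsDy (3 : Int) 0 = -1 := by decide
  refine ⟨?_, ?_, ?_, ?_⟩ <;>
    simp [stepNbr, stepCell, h0x, h0y, h1x, h1y, h2x, h2y, h3x, h3y, sub_eq_add_neg]

theorem foldNbrs (x y : Int) (st : List (Int × Int) × List (List String) × Int) :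
    (PySem.List.pyRange 0 4 1).foldl (stepNbr x y) st = (nbrs (x, y)).foldl stepCell st := by
  rw [show PySem.List.pyRange 0 4 1 = [0, 1, 2, 3] from by decide]
  simp only [nbrs, List.foldl_cons, List.foldl_nil]
  rw [(stepNbr_eval x y st).1]
  rw [(stepNbr_eval x y _).2.1]
  rw [(stepNbr_eval x y _).2.2.1]
  rw [(stepNbr_eval x y _).2.2.2]

theorem pushFold (x y : Int) (rest : List (Int × Int)) :
    dirs4.foldl (fun st d => (x + d.1, y + d.2) :: st) rest = (nbrs (x, y)).reverse ++ rest := by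
  simp [dirs4, nbrs, List.foldl_cons, List.foldl_nil, sub_eq_add_neg]

theorem stepCell_eq (q : List (Int × Int)) (g : List (List String)) (r : Int) (c : Int × Int) :
    stepCell (q, g, r) c =
      if okB g c = true then (q ++ [c], mark g c, r + valC g c) else (q, g, r) := by
  unfold stepCell okB mark valC
  by_cases h : (0 ≤ c.1 ∧ c.1 < (g.length : Int) ∧ 0 ≤ c.2 ∧ c.2 < (cols g : Int) ∧
      cellD g c.1 c.2 ≠ "-1" ∧ cellD g c.1 c.2 ≠ "X")
  · rw [if_pos h, if_pos (by simpa using h)]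
  · rw [if_neg h, if_neg (by simpa using h)]

theorem procList (cands : List (Int × Int)) (q : List (Int × Int)) (g : List (List String))
    (r : Int) (hnd : cands.Nodup) (hwf : WF g) :
    cands.foldl stepCell (q, g, r) =
      (q ++ cands.filter (fun c => okB g c), markList g (cands.filter (fun c => okB g c)),
        r + ((cands.filter (fun c => okB g c)).map (valC g)).sum) := by
  induction cands generalizing q g r with
  | nil => simp [markList]
  | cons c cs ih =>
    have hnd' := List.nodup_cons.mp hnd
    rw [List.foldl_cons, stepCell_eq]
    by_cases hok : okB g c = true
    · rw [if_pos hok]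
      have hcn := okB_nonneg hok
      rw [ih (q ++ [c]) (mark g c) (r + valC g c) hnd'.2 (WF_mark hwf c)]
      have hfilt : cs.filter (fun e => okB (mark g c) e) = cs.filter (fun e => okB g e) := by
        apply List.filter_congr
        intro e he
        rw [okB_mark_ne hcn.1 hcn.2.2.1 (fun h => hnd'.1 (h ▸ he))]
      have hval : ∀ e ∈ cs.filter (fun e => okB g e), valC (mark g c) e = valC g e := by
        intro e he
        have hee := List.mem_filter.mp he
        have hen := okB_nonneg (by simpa using hee.2)
        exact valC_mark_ne hcn.1 hcn.2.2.1 hen.1 hen.2.2.1 (fun h => hnd'.1 (h ▸ hee.1))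
      have hfc : (c :: cs).filter (fun e => okB g e) = c :: cs.filter (fun e => okB g e) := by
        simp [hok]
      rw [hfilt, hfc, markList_cons, List.map_cons, List.sum_cons,
        List.map_congr_left hval]
      simp [add_assoc]
    · rw [if_neg hok]
      rw [ih q g r hnd'.2 hwf]
      have hfc : (c :: cs).filter (fun e => okB g e) = cs.filter (fun e => okB g e) := by
        simp [hok]
      rw [hfc]


-- ---- the window Finset and live-cell count ----

theorem nbrs_nodup (c : Int × Int) : (nbrs c).Nodup := by
  simp [nbrs, Prod.ext_iff]
  omega

theorem mem_SA {g : List (List String)} {c : Int × Int} :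
    c ∈ SA g ↔ 0 ≤ c.1 ∧ c.1 < (g.length : Int) ∧ 0 ≤ c.2 ∧ c.2 < (cols g : Int) := by
  unfold SA
  simp only [Finset.mem_image, Finset.mem_product, Finset.mem_range, Prod.exists]
  constructor
  · rintro ⟨a, b, ⟨ha, hb⟩, rfl⟩
    simp
    omega
  · rintro ⟨h1, h2, h3, h4⟩
    refine ⟨c.1.toNat, c.2.toNat, ⟨by omega, by omega⟩, ?_⟩
    simp [Prod.ext_iff]
    omega

theorem card_SA (g : List (List String)) : (SA g).card = g.length * cols g := by
  unfold SA
  rw [Finset.card_image_of_injective _ (fun a b h => by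
    simp only [Prod.ext_iff] at h ⊢
    omega)]
  simp [Finset.card_product]

theorem SA_mark (g : List (List String)) (c : Int × Int) : SA (mark g c) = SA g := by
  unfold SA
  rw [length_mark, cols_mark]

theorem SA_markList (g : List (List String)) (M : List (Int × Int)) :
    SA (markList g M) = SA g := by
  unfold SA
  rw [length_markList, cols_markList]

theorem okB_mem_SA {g : List (List String)} {c : Int × Int} (h : okB g c = true) : c ∈ SA g :=
  mem_SA.mpr (okB_nonneg h)

theorem okCard_markList {g : List (List String)} {M : List (Int × Int)} (hwf : WF g)
    (hM : ∀ m ∈ M, okB g m = true) (hnd : M.Nodup) :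
    okCard (markList g M) + M.length = okCard g := by
  unfold okCard
  have hsub : M.toFinset ⊆ (SA g).filter (fun c => okB g c = true) := by
    intro m hm
    have hm' := List.mem_toFinset.mp hm
    exact Finset.mem_filter.mpr ⟨okB_mem_SA (hM m hm'), hM m hm'⟩
  have hset : (SA (markList g M)).filter (fun c => okB (markList g M) c = true) =
      ((SA g).filter (fun c => okB g c = true)) \ M.toFinset := by
    rw [SA_markList]
    ext n
    simp only [Finset.mem_filter, Finset.mem_sdiff, List.mem_toFinset,
      okB_markList hwf hM hnd]
    tauto
  rw [hset]
  have hcard := Finset.card_sdiff_add_card_eq_card hsub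
  rw [List.toFinset_card_of_nodup hnd] at hcard
  omega

theorem okCard_mark {g : List (List String)} {c : Int × Int} (hwf : WF g)
    (hc : okB g c = true) : okCard (mark g c) + 1 = okCard g := by
  have := okCard_markList (M := [c]) hwf (by simpa using hc) (by simp)
  simpa [markList] using this

theorem okCard_le (g : List (List String)) : okCard g ≤ g.length * cols g := by
  calc okCard g ≤ (SA g).card := Finset.card_filter_le _ _
  _ = g.length * cols g := card_SA g

-- ---- reachability ----

theorem starMono {g g' : List (List String)}
    (h : ∀ b, okB g' b = true → okB g b = true) {t n : Int × Int} :
    reachStar g' t n → reachStar g t n :=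
  Relation.ReflTransGen.mono (fun u v hr => show adjRel g u v from ⟨hr.1, h v hr.2⟩)

theorem star_okB_end {g : List (List String)} {t n : Int × Int} (h : reachStar g t n) :
    n = t ∨ okB g n = true := by
  rcases Relation.ReflTransGen.cases_tail h with h | ⟨_, _, hr⟩
  · left; exact h
  · right; exact hr.2

theorem okB_mark_mono {g : List (List String)} {c : Int × Int} (hwf : WF g)
    (hc1 : 0 ≤ c.1) (hc2 : 0 ≤ c.2) (b : Int × Int) (hb : okB (mark g c) b = true) :
    okB g b = true := by
  by_cases hbc : b = c
  · subst hbc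
    rw [okB_mark_self hwf] at hb
    cases hb
  · rwa [okB_mark_ne hc1 hc2 hbc] at hb

theorem okB_markList_mono {g : List (List String)} {M : List (Int × Int)} (hwf : WF g)
    (hM : ∀ m ∈ M, okB g m = true) (hnd : M.Nodup) (b : Int × Int)
    (hb : okB (markList g M) b = true) : okB g b = true :=
  ((okB_markList hwf hM hnd b).mp hb).1


-- ---- one processing step, seen on the reachability sets ----

theorem starA_decomp {g : List (List String)} (hwf : WF g) (c : Int × Int)
    {s n : Int × Int} (h : reachStar g s n)
    (hMok : ∀ m ∈ (nbrs c).filter (fun m => okB g m), okB g m = true)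
    (hMnd : ((nbrs c).filter (fun m => okB g m)).Nodup) :
    n = s ∨ n ∈ (nbrs c).filter (fun m => okB g m) ∨
      (okB (markList g ((nbrs c).filter (fun m => okB g m))) n = true ∧
       ∃ t ∈ s :: (nbrs c).filter (fun m => okB g m),
         reachStar (markList g ((nbrs c).filter (fun m => okB g m))) t n) := by
  induction h with
  | refl => left; rfl
  | @tail m n' hmb hstep ih =>
    by_cases hnM : n' ∈ (nbrs c).filter (fun m => okB g m)
    · right; left; exact hnM
    · have hokn' : okB (markList g ((nbrs c).filter (fun m => okB g m))) n' = true :=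
        (okB_markList hwf hMok hMnd n').mpr ⟨hstep.2, hnM⟩
      rcases ih with rfl | hmM | ⟨hokm, t, ht, hstar⟩
      · right; right
        exact ⟨hokn', m, List.mem_cons_self,
          Relation.ReflTransGen.single ⟨hstep.1, hokn'⟩⟩
      · right; right
        exact ⟨hokn', m, List.mem_cons_of_mem _ hmM,
          Relation.ReflTransGen.single ⟨hstep.1, hokn'⟩⟩
      · right; right
        exact ⟨hokn', t, ht, hstar.tail ⟨hstep.1, hokn'⟩⟩

theorem NRA_step {g : List (List String)} (hwf : WF g) {c : Int × Int}
    (hc : okB g c = false) (q : List (Int × Int)) (n : Int × Int) :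
    NRA g (c :: q) n ↔
      (n ∈ (nbrs c).filter (fun m => okB g m) ∨
       NRA (markList g ((nbrs c).filter (fun m => okB g m)))
         (q ++ (nbrs c).filter (fun m => okB g m)) n) := by
  have hMok : ∀ m ∈ (nbrs c).filter (fun m => okB g m), okB g m = true := by
    intro m hm; simpa using (List.mem_filter.mp hm).2
  have hMnd : ((nbrs c).filter (fun m => okB g m)).Nodup := (nbrs_nodup c).filter _
  constructor
  · rintro ⟨hokn, t, ht, hstar⟩
    by_cases hnM : n ∈ (nbrs c).filter (fun m => okB g m)
    · left; exact hnM
    right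
    rcases starA_decomp hwf c hstar hMok hMnd with hnt | hnM' | ⟨hokn', u, hu, hstar'⟩
    · -- n is the root t itself
      rcases List.mem_cons.mp ht with htc | htq
      · rw [hnt, htc, hc] at hokn; cases hokn
      · rw [hnt]
        exact ⟨(okB_markList hwf hMok hMnd t).mpr ⟨hnt ▸ hokn, hnt ▸ hnM⟩, t,
          List.mem_append_left _ htq, Relation.ReflTransGen.refl⟩
    · exact absurd hnM' hnM
    · rcases List.mem_cons.mp hu with hut | huM
      · -- the decomposition's root is t itself
        rcases List.mem_cons.mp ht with htc | htq
        · -- t = c: a g'-path from c must be trivial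
          rw [hut, htc] at hstar'
          rcases Relation.ReflTransGen.cases_head hstar' with hcn2 | ⟨w, hrel, _⟩
          · rw [← hcn2, hc] at hokn; cases hokn
          · have hwok : okB g w = true :=
              okB_markList_mono hwf hMok hMnd w hrel.2
            have hwM : w ∈ (nbrs c).filter (fun m => okB g m) :=
              List.mem_filter.mpr ⟨hrel.1, by simpa using hwok⟩
            have := ((okB_markList hwf hMok hMnd w).mp hrel.2).2
            exact absurd hwM this
        · exact ⟨hokn', t, List.mem_append_left _ htq, hut ▸ hstar'⟩
      · exact ⟨hokn', u, List.mem_append_right _ huM, hstar'⟩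
  · rintro (hnM | ⟨hokn', t, ht, hstar'⟩)
    · have hf := List.mem_filter.mp hnM
      exact ⟨by simpa using hf.2, c, List.mem_cons_self,
        Relation.ReflTransGen.single ⟨hf.1, by simpa using hf.2⟩⟩
    · have hokn := okB_markList_mono hwf hMok hMnd n hokn'
      have hstar : reachStar g t n := starMono (okB_markList_mono hwf hMok hMnd) hstar'
      rcases List.mem_append.mp ht with htq | htM
      · exact ⟨hokn, t, List.mem_cons_of_mem _ htq, hstar⟩
      · have htf := List.mem_filter.mp htM
        exact ⟨hokn, c, List.mem_cons_self,
          (Relation.ReflTransGen.single ⟨htf.1, by simpa using htf.2⟩).trans hstar⟩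

theorem NRA_okB {g : List (List String)} {roots : List (Int × Int)} {n : Int × Int}
    (h : NRA g roots n) : okB g n = true := h.1

theorem chargeA_nil (g : List (List String)) : chargeA g [] = 0 := by
  classical
  unfold chargeA
  have he := Finset.eq_empty_of_forall_notMem (s := @Finset.filter _ (fun c => NRA g [] c)
      (fun c => Classical.propDecidable _) (SA g)) (fun n hn => by
    have h := (Finset.mem_filter.mp hn).2
    simp only [NRA] at h
    obtain ⟨-, t, ht, -⟩ := h
    exact List.not_mem_nil ht)
  rw [he]
  rfl

theorem chargeA_step {g : List (List String)} (hwf : WF g) {c : Int × Int}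
    (hc : okB g c = false) (q : List (Int × Int)) :
    chargeA g (c :: q) =
      (((nbrs c).filter (fun m => okB g m)).map (valC g)).sum +
      chargeA (markList g ((nbrs c).filter (fun m => okB g m)))
        (q ++ (nbrs c).filter (fun m => okB g m)) := by
  classical
  have hMok : ∀ m ∈ (nbrs c).filter (fun m => okB g m), okB g m = true := by
    intro m hm; simpa using (List.mem_filter.mp hm).2
  have hMnd : ((nbrs c).filter (fun m => okB g m)).Nodup := (nbrs_nodup c).filter _
  unfold chargeA
  rw [SA_markList]
  have hset : (@Finset.filter _ (fun n => NRA g (c :: q) n)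
        (fun c => Classical.propDecidable _) (SA g)) =
      ((nbrs c).filter (fun m => okB g m)).toFinset ∪
      (@Finset.filter _ (fun n => NRA (markList g ((nbrs c).filter (fun m => okB g m)))
          (q ++ (nbrs c).filter (fun m => okB g m)) n)
        (fun c => Classical.propDecidable _) (SA g)) := by
    ext n
    simp only [Finset.mem_filter, Finset.mem_union, List.mem_toFinset]
    constructor
    · rintro ⟨hsa, hn⟩
      rcases (NRA_step hwf hc q n).mp hn with h | h
      · left; exact h
      · right; exact ⟨hsa, h⟩
    · rintro (h | ⟨hsa, h⟩)
      · exact ⟨okB_mem_SA (hMok n h), (NRA_step hwf hc q n).mpr (Or.inl h)⟩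
      · exact ⟨hsa, (NRA_step hwf hc q n).mpr (Or.inr h)⟩
  have hdisj : Disjoint ((nbrs c).filter (fun m => okB g m)).toFinset
      (@Finset.filter _ (fun n => NRA (markList g ((nbrs c).filter (fun m => okB g m)))
          (q ++ (nbrs c).filter (fun m => okB g m)) n)
        (fun c => Classical.propDecidable _) (SA g)) := by
    rw [Finset.disjoint_left]
    intro a haM haf
    have hna := (Finset.mem_filter.mp haf).2
    exact ((okB_markList hwf hMok hMnd a).mp (NRA_okB hna)).2 (List.mem_toFinset.mp haM)
  rw [hset, Finset.sum_union hdisj, List.sum_toFinset _ hMnd]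
  congr 1
  apply Finset.sum_congr rfl
  intro n hn
  have hna := (Finset.mem_filter.mp hn).2
  have hok' := NRA_okB hna
  have h2 := (okB_markList hwf hMok hMnd n).mp hok'
  have hnn := okB_nonneg h2.1
  exact (valC_markList hMok hMnd hnn.1 hnn.2.2.1 h2.2).symm

theorem starB_decomp {g : List (List String)} {c : Int × Int}
    (hc : okB g c = true) {t n : Int × Int} (ht : okB g t = true)
    (h : reachStar g t n) :
    n = c ∨ (okB (mark g c) n = true ∧
      ∃ u ∈ t :: nbrs c, okB (mark g c) u = true ∧ reachStar (mark g c) u n) := by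
  have hcn := okB_nonneg hc
  induction h with
  | refl =>
    by_cases htc : t = c
    · left; exact htc
    · right
      have : okB (mark g c) t = true := by
        rw [okB_mark_ne hcn.1 hcn.2.2.1 htc]; exact ht
      exact ⟨this, t, List.mem_cons_self, this, Relation.ReflTransGen.refl⟩
  | @tail m n' hmb hstep ih =>
    by_cases hnc : n' = c
    · left; exact hnc
    · have hokn' : okB (mark g c) n' = true := by
        rw [okB_mark_ne hcn.1 hcn.2.2.1 hnc]; exact hstep.2
      rcases ih with rfl | ⟨hokm, u, hu, hoku, hstar⟩
      · right
        exact ⟨hokn', n', List.mem_cons_of_mem _ hstep.1, hokn', Relation.ReflTransGen.refl⟩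
      · right
        exact ⟨hokn', u, hu, hoku, hstar.tail ⟨hstep.1, hokn'⟩⟩

theorem NRB_okB {g : List (List String)} {roots : List (Int × Int)} {n : Int × Int}
    (h : NRB g roots n) : okB g n = true := by
  obtain ⟨u, _, hoku, hstar⟩ := h
  rcases star_okB_end hstar with rfl | h
  · exact hoku
  · exact h

theorem NRB_step_ok {g : List (List String)} (hwf : WF g) {c : Int × Int}
    (hc : okB g c = true) (rest : List (Int × Int)) (n : Int × Int) :
    NRB g (c :: rest) n ↔
      (n = c ∨ NRB (mark g c) ((nbrs c).reverse ++ rest) n) := by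
  have hcn := okB_nonneg hc
  constructor
  · rintro ⟨t, ht, hokt, hstar⟩
    rcases starB_decomp hc hokt hstar with hnc | ⟨hokn, u, hu, hoku, hstar'⟩
    · left; exact hnc
    · right
      rcases List.mem_cons.mp hu with hut | hunb
      · rcases List.mem_cons.mp ht with htc | htr
        · rw [hut, htc, okB_mark_self hwf] at hoku; cases hoku
        · exact ⟨t, List.mem_append_right _ htr, hut ▸ hoku, hut ▸ hstar'⟩
      · exact ⟨u, List.mem_append_left _ (List.mem_reverse.mpr hunb), hoku, hstar'⟩
  · rintro (rfl | ⟨u, hu, hoku, hstar⟩)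
    · exact ⟨n, List.mem_cons_self, hc, Relation.ReflTransGen.refl⟩
    · have hokgu : okB g u = true := okB_mark_mono hwf hcn.1 hcn.2.2.1 u hoku
      have hstarg : reachStar g u n :=
        starMono (okB_mark_mono hwf hcn.1 hcn.2.2.1) hstar
      rcases List.mem_append.mp hu with hurev | hur
      · exact ⟨c, List.mem_cons_self, hc,
          (Relation.ReflTransGen.single ⟨List.mem_reverse.mp hurev, hokgu⟩).trans hstarg⟩
      · exact ⟨u, List.mem_cons_of_mem _ hur, hokgu, hstarg⟩

theorem NRB_step_skip {g : List (List String)} {c : Int × Int}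
    (hc : okB g c = false) (rest : List (Int × Int)) (n : Int × Int) :
    NRB g (c :: rest) n ↔ NRB g rest n := by
  constructor
  · rintro ⟨t, ht, hokt, hstar⟩
    rcases List.mem_cons.mp ht with rfl | htr
    · rw [hc] at hokt; cases hokt
    · exact ⟨t, htr, hokt, hstar⟩
  · rintro ⟨t, ht, hokt, hstar⟩
    exact ⟨t, List.mem_cons_of_mem _ ht, hokt, hstar⟩

theorem chargeB_nil (g : List (List String)) : chargeB g [] = 0 := by
  classical
  unfold chargeB
  have he := Finset.eq_empty_of_forall_notMem (s := @Finset.filter _ (fun c => NRB g [] c)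
      (fun c => Classical.propDecidable _) (SA g)) (fun n hn => by
    have h := (Finset.mem_filter.mp hn).2
    simp only [NRB] at h
    obtain ⟨t, ht, -, -⟩ := h
    exact List.not_mem_nil ht)
  rw [he]
  rfl

theorem chargeB_step_skip {g : List (List String)} {c : Int × Int}
    (hc : okB g c = false) (rest : List (Int × Int)) :
    chargeB g (c :: rest) = chargeB g rest := by
  unfold chargeB
  congr 1
  ext n
  simp only [Finset.mem_filter]
  rw [NRB_step_skip hc]

theorem chargeB_step_ok {g : List (List String)} (hwf : WF g) {c : Int × Int}
    (hc : okB g c = true) (rest : List (Int × Int)) :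
    chargeB g (c :: rest) =
      valC g c + chargeB (mark g c) ((nbrs c).reverse ++ rest) := by
  classical
  have hcn := okB_nonneg hc
  unfold chargeB
  rw [SA_mark]
  have hset : (@Finset.filter _ (fun n => NRB g (c :: rest) n)
        (fun c => Classical.propDecidable _) (SA g)) =
      {c} ∪ (@Finset.filter _ (fun n => NRB (mark g c) ((nbrs c).reverse ++ rest) n)
        (fun c => Classical.propDecidable _) (SA g)) := by
    ext n
    simp only [Finset.mem_filter, Finset.mem_union, Finset.mem_singleton]
    constructor
    · rintro ⟨hsa, hn⟩
      rcases (NRB_step_ok hwf hc rest n).mp hn with h | h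
      · left; exact h
      · right; exact ⟨hsa, h⟩
    · rintro (rfl | ⟨hsa, h⟩)
      · exact ⟨okB_mem_SA hc, (NRB_step_ok hwf hc rest n).mpr (Or.inl rfl)⟩
      · exact ⟨hsa, (NRB_step_ok hwf hc rest n).mpr (Or.inr h)⟩
  have hdisj : Disjoint ({c} : Finset (Int × Int))
      (@Finset.filter _ (fun n => NRB (mark g c) ((nbrs c).reverse ++ rest) n)
        (fun c => Classical.propDecidable _) (SA g)) := by
    rw [Finset.disjoint_left]
    intro a ha haf
    rw [Finset.mem_singleton] at ha
    subst ha
    have := NRB_okB (Finset.mem_filter.mp haf).2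
    rw [okB_mark_self hwf] at this
    cases this
  rw [hset, Finset.sum_union hdisj, Finset.sum_singleton]
  congr 1
  apply Finset.sum_congr rfl
  intro n hn
  have hok' := NRB_okB (Finset.mem_filter.mp hn).2
  have hnn := okB_nonneg hok'
  have hnc : n ≠ c := by
    intro h
    rw [h, okB_mark_self hwf] at hok'
    cases hok'
  exact (valC_mark_ne hcn.1 hcn.2.2.1 hnn.1 hnn.2.2.1 hnc).symm

theorem chargeA_eq_chargeB {g : List (List String)} {c : Int × Int}
    (hc : okB g c = false) :
    chargeA g [c] = chargeB g ((nbrs c).reverse) := by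
  unfold chargeA chargeB
  congr 1
  ext n
  simp only [Finset.mem_filter]
  constructor
  · rintro ⟨hsa, hokn, t, ht, hstar⟩
    rcases List.mem_cons.mp ht with rfl | h
    · rcases Relation.ReflTransGen.cases_head hstar with rfl | ⟨w, hrel, hstar'⟩
      · rw [hc] at hokn; cases hokn
      · exact ⟨hsa, w, List.mem_reverse.mpr hrel.1, hrel.2, hstar'⟩
    · exact absurd h (List.not_mem_nil)
  · rintro ⟨hsa, u, hu, hoku, hstar⟩
    refine ⟨hsa, ?_, c, List.mem_cons_self, ?_⟩
    · rcases star_okB_end hstar with rfl | h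
      · exact hoku
      · exact h
    · exact (Relation.ReflTransGen.single ⟨List.mem_reverse.mp hu, hoku⟩).trans hstar


-- ---- the two loops compute the charge of their worklist ----

theorem loopA_eq : ∀ (fuel : Nat) (q : List (Int × Int)) (g : List (List String)) (r : Int),
    WF g → (∀ e ∈ q, okB g e = false) → q.length + okCard g ≤ fuel →
    bfsLoop fuel q g r = r + chargeA g q := by
  intro fuel
  induction fuel with
  | zero =>
    intro q g r hwf hq hf
    have hq0 : q = [] := List.eq_nil_of_length_eq_zero (by omega)
    subst hq0
    simp [bfsLoop, chargeA_nil]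
  | succ fuel ih =>
    intro q g r hwf hq hf
    cases q with
    | nil => simp [bfsLoop, chargeA_nil]
    | cons c q' =>
      obtain ⟨x, y⟩ := c
      have hc : okB g (x, y) = false := hq (x, y) List.mem_cons_self
      simp only [bfsLoop]
      rw [foldNbrs, procList (nbrs (x, y)) q' g r (nbrs_nodup _) hwf]
      simp only []
      have hMok : ∀ m ∈ (nbrs (x, y)).filter (fun m => okB g m), okB g m = true := by
        intro m hm; simpa using (List.mem_filter.mp hm).2
      have hMnd : ((nbrs (x, y)).filter (fun m => okB g m)).Nodup := (nbrs_nodup _).filter _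
      have hcnt := okCard_markList (M := (nbrs (x, y)).filter (fun m => okB g m)) hwf hMok hMnd
      rw [ih (q' ++ (nbrs (x, y)).filter (fun m => okB g m))
        (markList g ((nbrs (x, y)).filter (fun m => okB g m)))
        (r + (((nbrs (x, y)).filter (fun m => okB g m)).map (valC g)).sum)
        (WF_markList hwf _)
        (by
          intro e he
          rcases List.mem_append.mp he with heq | heM
          · cases hb : okB (markList g ((nbrs (x, y)).filter (fun m => okB g m))) e
            · rfl
            · have := okB_markList_mono hwf hMok hMnd e hb
              rw [hq e (List.mem_cons_of_mem _ heq)] at this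
              cases this
          · cases hb : okB (markList g ((nbrs (x, y)).filter (fun m => okB g m))) e
            · rfl
            · have := ((okB_markList hwf hMok hMnd e).mp hb).2
              exact absurd heM this)
        (by
          simp only [List.length_append, List.length_cons] at hf ⊢
          omega)]
      rw [chargeA_step hwf hc q']
      ring

theorem loopB_eq : ∀ (fuel : Nat) (st : List (Int × Int)) (g : List (List String)) (total : Int),
    WF g → st.length + 5 * okCard g ≤ fuel →
    floodLoop fuel st g total = total + chargeB g st := by
  intro fuel
  induction fuel with
  | zero =>
    intro st g total hwf hf
    have hst0 : st = [] := List.eq_nil_of_length_eq_zero (by omega)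
    subst hst0
    simp [floodLoop, chargeB_nil]
  | succ fuel ih =>
    intro st g total hwf hf
    cases st with
    | nil => simp [floodLoop, chargeB_nil]
    | cons c rest =>
      obtain ⟨x, y⟩ := c
      simp only [floodLoop]
      by_cases h : (0 ≤ x ∧ x < (g.length : Int) ∧ 0 ≤ y ∧ y < (cols g : Int) ∧
          cellD g x y ≠ "-1" ∧ cellD g x y ≠ "X")
      · rw [if_pos h]
        have hok : okB g (x, y) = true := decide_eq_true h
        have hcnt := okCard_mark (c := (x, y)) hwf hok
        rw [pushFold]
        rw [ih ((nbrs (x, y)).reverse ++ rest) (gridSet g x y "-1")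
          (total + (PySem.Int.ofStr? (cellD g x y)).getD 0)
          (WF_gridSet hwf x y "-1")
          (by
            simp only [List.length_append, List.length_reverse, List.length_cons] at hf ⊢
            have : (nbrs (x, y)).length = 4 := rfl
            have hm : (mark g (x, y)) = gridSet g x y "-1" := rfl
            rw [← hm]
            omega)]
        rw [show gridSet g x y "-1" = mark g (x, y) from rfl,
          chargeB_step_ok hwf hok rest]
        have hv : (PySem.Int.ofStr? (cellD g x y)).getD 0 = valC g (x, y) := rfl
        rw [hv]
        ring
      · rw [if_neg h]
        have hok : okB g (x, y) = false := decide_eq_false h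
        rw [ih rest g total hwf (by simp only [List.length_cons] at hf; omega)]
        rw [chargeB_step_skip hok rest]


theorem bfsLoop_nil (fuel : Nat) (g : List (List String)) (r : Int) :
    bfsLoop fuel [] g r = r := by
  cases fuel <;> rfl

theorem foldSkip (cands : List (Int × Int)) (q : List (Int × Int)) (g : List (List String))
    (r : Int) (h : ∀ c ∈ cands, okB g c = false) :
    cands.foldl stepCell (q, g, r) = (q, g, r) := by
  induction cands with
  | nil => rfl
  | cons c cs ih =>
    rw [List.foldl_cons, stepCell_eq, if_neg (by simp [h c List.mem_cons_self]),
      ih (fun e he => h e (List.mem_cons_of_mem _ he))]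

theorem floodSkip : ∀ (fuel : Nat) (st : List (Int × Int)) (g : List (List String)) (total : Int),
    (∀ c ∈ st, okB g c = false) → floodLoop fuel st g total = total := by
  intro fuel
  induction fuel with
  | zero => intro st g total _; rfl
  | succ f ih =>
    intro st g total h
    cases st with
    | nil => rfl
    | cons c rest =>
      obtain ⟨x, y⟩ := c
      simp only [floodLoop]
      rw [if_neg (by
        intro hp
        have hd : okB g (x, y) = true := decide_eq_true hp
        rw [h (x, y) List.mem_cons_self] at hd
        cases hd)]
      exact ih rest g total (fun e he => h e (List.mem_cons_of_mem _ he))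

theorem cellAt_eq {data : List (List String)} {x y : Int} {v : String}
    (h : cellAt data x y = some v) : cellD data x y = v := by
  unfold cellAt at h
  unfold cellD
  cases hr : PySem.List.pyGet? data x with
  | none =>
    rw [hr] at h
    simp only [Option.getD_none] at h
    unfold PySem.List.pyGet? PySem.List.pyIdx? at h
    split_ifs at h <;> simp_all
  | some row =>
    rw [hr] at h
    simp only [Option.getD_some] at h
    simp only [Option.bind_some]
    rw [h]
    rfl

theorem cellD_gridSet_mem {g : List (List String)} (a b : Int) (v : String) {x y : Int}
    (hx : 0 ≤ x) (hy : 0 ≤ y) :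
    cellD (gridSet g a b v) x y = v ∨ cellD (gridSet g a b v) x y = cellD g x y := by
  cases hk : PySem.List.pyIdx? g.length a with
  | none => right; rw [gridSet_eq_of_none hk]
  | some k =>
    obtain ⟨row, hrow, heq⟩ := gridSet_eq_of_idx hk b v
    have hklt : k < g.length := pvIdx_lt hk
    rw [heq, cellD_of_nonneg _ hx hy, cellD_of_nonneg _ hx hy]
    by_cases hxk : x.toNat = k
    · have hxget : (g.set k (PySem.List.pySetD row b v))[x.toNat]? =
          some (PySem.List.pySetD row b v) := by
        rw [hxk]; simp [hklt]
      rw [hxget]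
      have hrow' : g[x.toNat]? = some row := by rw [hxk]; exact hrow
      rw [hrow']
      simp only [Option.getD_some]
      cases hk2 : PySem.List.pyIdx? row.length b with
      | none =>
        right
        have : PySem.List.pySetD row b v = row := by
          simp [PySem.List.pySetD, PySem.List.pySet?, hk2]
        rw [this]
      | some k2 =>
        have : PySem.List.pySetD row b v = row.set k2 v := by
          simp [PySem.List.pySetD, PySem.List.pySet?, hk2]
        rw [this]
        by_cases hyk : y.toNat = k2
        · left
          have hk2lt : k2 < row.length := pvIdx_lt hk2
          rw [hyk]
          simp [hk2lt]
        · right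
          rw [List.getElem?_set_ne (by omega)]
    · right
      rw [List.getElem?_set_ne (by omega)]

theorem okB_gridSet_start_false {data : List (List String)} {x0 y0 : Int} {row : List String}
    {t : String} (hrowx : PySem.List.pyGet? data x0 = some row)
    (hcell : PySem.List.pyGet? row y0 = some t) :
    okB (gridSet data x0 y0 "-1") (x0, y0) = false := by
  by_cases hw : 0 ≤ x0 ∧ x0 < (data.length : Int) ∧ 0 ≤ y0 ∧ y0 < (cols data : Int)
  · -- in-window start: the mark sticks, the cell reads back "-1"
    obtain ⟨hx0, hxlt, hy0, _⟩ := hw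
    have hidx : PySem.List.pyIdx? data.length x0 = some x0.toNat := by
      unfold PySem.List.pyIdx?; rw [if_pos hx0, if_pos hxlt]
    obtain ⟨row', hrow', heq⟩ := gridSet_eq_of_idx hidx y0 "-1"
    have hxltn : x0.toNat < data.length := pvIdx_lt hidx
    have hrow2 : row' = row := by
      rw [pvGet_nonneg data x0 hx0, hrow'] at hrowx
      exact (Option.some.injEq _ _ ▸ hrowx).symm ▸ rfl
    have hylt : y0.toNat < row.length := by
      rw [pvGet_nonneg row y0 hy0] at hcell
      exact (List.getElem?_eq_some_iff.mp hcell).1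
    have hcm : cellD (gridSet data x0 y0 "-1") x0 y0 = "-1" := by
      rw [heq, cellD_of_nonneg _ hx0 hy0]
      have h1 : (data.set x0.toNat (PySem.List.pySetD row' y0 "-1"))[x0.toNat]? =
          some (PySem.List.pySetD row' y0 "-1") := by simp [hxltn]
      rw [h1]
      simp only [Option.getD_some]
      rw [hrow2, PySem.List.pySetD_of_nonneg row "-1" hy0]
      simp [hylt]
    unfold okB
    simp only [decide_eq_false_iff_not]
    intro hcon
    exact hcon.2.2.2.2.1 hcm
  · unfold okB
    simp only [decide_eq_false_iff_not]
    intro hcon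
    rw [length_gridSet, cols_gridSet] at hcon
    exact hw ⟨hcon.1, hcon.2.1, hcon.2.2.1, hcon.2.2.2.1⟩

-- ===== VERDICT (by name: the statements are the Claim_ definitions above) =====
theorem bfs_spec : Claim_equal_bfs := by
  unfold Claim_equal_bfs
  intro s data hdom hpre
  unfold Spec_bfs
  obtain ⟨hs1, hs2, hclean⟩ := hpre
  unfold startCell at hs1 hs2
  cases hx : PySem.List.pyGet? s 0 with
  | none => rw [hx] at hs1; simp at hs1
  | some x0 =>
  rw [hx] at hs1 hs2
  simp only [Option.bind_some] at hs1 hs2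
  cases hy : PySem.List.pyGet? s 1 with
  | none => rw [hy] at hs1; simp at hs1
  | some y0 =>
  rw [hy] at hs1 hs2
  simp only [Option.bind_some] at hs1 hs2
  cases hrowx : PySem.List.pyGet? data x0 with
  | none => rw [hrowx] at hs1; simp at hs1
  | some row =>
  rw [hrowx] at hs1 hs2
  simp only [Option.bind_some] at hs1 hs2
  cases hcell : PySem.List.pyGet? row y0 with
  | none => rw [hcell] at hs1; simp at hs1
  | some t =>
  have hxD : PySem.List.pyGetD s 0 0 = x0 := by
    unfold PySem.List.pyGetD; rw [hx]; rfl
  have hyD : PySem.List.pyGetD s 1 0 = y0 := by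
    unfold PySem.List.pyGetD; rw [hy]; rfl
  have hg1ok : okB (gridSet data x0 y0 "-1") (x0, y0) = false :=
    okB_gridSet_start_false hrowx hcell
  show bfs s data = bfs_alt s data
  unfold bfs bfs_alt
  rw [hx, hy]
  simp only [Option.getD_some]
  rcases hclean with hrows | hencl
  · -- globally clean grid: the general charge argument
    have hwf : WF data := fun r h => (hrows r h).1
    have hg1wf : WF (gridSet data x0 y0 "-1") := WF_gridSet hwf x0 y0 "-1"
    have hcardA : okCard (gridSet data x0 y0 "-1") ≤ data.length * cols data := by
      have h1 := okCard_le (gridSet data x0 y0 "-1")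
      rw [length_gridSet, cols_gridSet] at h1
      exact h1
    rw [loopA_eq (data.length * cols data + 1) [(x0, y0)] (gridSet data x0 y0 "-1")
      ((PySem.Int.ofStr? (cellD data x0 y0)).getD 0) hg1wf
      (by intro e he; rw [List.mem_singleton] at he; rw [he]; exact hg1ok)
      (by simp only [List.length_singleton]; omega)]
    rw [loopB_eq (5 * (data.length * cols data) + 4)
      [(x0, y0 - 1), (x0 - 1, y0), (x0, y0 + 1), (x0 + 1, y0)] (gridSet data x0 y0 "-1")
      ((PySem.Int.ofStr? (cellD data x0 y0)).getD 0) hg1wf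
      (by simp only [List.length_cons, List.length_nil]; omega)]
    rw [show ([(x0, y0 - 1), (x0 - 1, y0), (x0, y0 + 1), (x0 + 1, y0)] : List (Int × Int)) =
      (nbrs (x0, y0)).reverse from rfl]
    rw [chargeA_eq_chargeB hg1ok]
  · -- enclosed start: neither program processes anything beyond the seed cell
    rw [hxD, hyD] at hencl
    have hnb : ∀ p ∈ nbrs (x0, y0), okB (gridSet data x0 y0 "-1") p = false := by
      intro p hp
      have hcond := hencl p (by simpa [nbrs] using hp)
      cases hb : okB (gridSet data x0 y0 "-1") p
      · rfl
      exfalso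
      have hbn := okB_nonneg hb
      rw [length_gridSet, cols_gridSet] at hbn
      unfold okB at hb
      simp only [decide_eq_true_eq] at hb
      rcases hcond with hout | hX2 | hneg2
      · omega
      · rcases cellD_gridSet_mem x0 y0 "-1" hbn.1 hbn.2.2.1 with hc | hc
        · exact hb.2.2.2.2.1 hc
        · exact hb.2.2.2.2.2 (by rw [hc, cellAt_eq hX2])
      · rcases cellD_gridSet_mem x0 y0 "-1" hbn.1 hbn.2.2.1 with hc | hc
        · exact hb.2.2.2.2.1 hc
        · exact hb.2.2.2.2.1 (by rw [hc, cellAt_eq hneg2])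
    simp only [bfsLoop]
    rw [foldNbrs, foldSkip (nbrs (x0, y0)) [] _ _ hnb]
    simp only []
    rw [bfsLoop_nil]
    rw [show ([(x0, y0 - 1), (x0 - 1, y0), (x0, y0 + 1), (x0 + 1, y0)] : List (Int × Int)) =
      (nbrs (x0, y0)).reverse from rfl]
    rw [floodSkip _ _ _ _ (fun e he => hnb e (List.mem_reverse.mp he))]
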